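-- pv_equiv track=rewrite | github.com/oisee/z80-optimizer | scripts/gen_div8_table.py | find_magic
-- ===== SOURCE A (Python) =====
-- import math
--
-- def find_magic(k):
--     """Find (M, S) pair for unsigned 8-bit div by K.
--
--     We need: floor(A * M / 2^S) = floor(A / K) for all A in 0..255.
--     M must be in 2..255 (so we can use mul16 table).
--     S must be >= 8 (so result is in high byte or above).
--
--     Strategy: try formula first, then exhaustive scan of all (S, M).
--     Prefer smallest S (fewest SRL instructions), then smallest M.
--     """
--     # Try formula first for each S
--     for s in range(8, 20):
--         m = math.ceil((1 << s) / k)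
--         if 2 <= m <= 255:
--             if _verify(k, m, s):
--                 return (m, s)
--
--     # Exhaustive: try ALL M for each S
--     for s in range(8, 20):
--         for m in range(2, 256):
--             if _verify(k, m, s):
--                 return (m, s)
--
--     return None
--
-- def _verify(k, m, s):
--     for a in range(256):
--         if (a * m) >> s != a // k:
--             return False
--     return True
-- ===== SOURCE B (Python) =====
-- import math
--
--
-- def _interval(k, s):
--     """Exact admissible range [lo, hi] of multipliers m (for m >= 2) such that
--     floor(a*m / 2**s) == a // k holds for EVERY a in 0..255, for k >= 1.
--
--     The per-a constraints q*2**s <= a*m <= (q+1)*2**s - 1 (q = a//k) are binding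
--     only at a = multiples of k (lower bound) and at the last a of a quotient
--     block (upper bound); over full blocks the upper bound decreases with q, so
--     only a = qmax*k - 1 and a = 255 matter.
--     """
--     qmax = 255 // k
--     if qmax == 0:
--         return (2, ((1 << s) - 1) // 255)
--     lo = -((1 << s) // -k)                                  # ceil(2**s / k)
--     hi = ((qmax + 1) * (1 << s) - 1) // 255                 # binding at a = 255
--     hi = min(hi, (qmax * (1 << s) - 1) // (qmax * k - 1))   # binding at a = qmax*k - 1
--     return (lo, hi)
--
--
-- def find_magic(k):
--     """Find (M, S) pair for unsigned 8-bit div by K, smallest S then smallest M,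
--     deciding validity by a closed-form interval instead of scanning all 256 A."""
--     if k < 0:
--         return None  # a//k < 0 for a >= 1 can never equal the nonnegative (a*m) >> s
--     for s in range(8, 20):
--         m = -((1 << s) // -k)  # ceil(2**s / k); raises ZeroDivisionError for k == 0 as A does
--         if 2 <= m <= 255:
--             lo, hi = _interval(k, s)
--             if lo <= m <= hi:
--                 return (m, s)
--     for s in range(8, 20):
--         lo, hi = _interval(k, s)
--         m = max(lo, 2)
--         if m <= min(hi, 255):
--             return (m, s)
--     return None
-- ===== Notes on version B (the rewrite author's own statement) =====
-- stated objective: faster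
-- what changed: Validity of (k,m,s) is decided by a closed-form admissible interval for m (binding constraints at a=255, a=qmax*k-1 and multiples of k) instead of scanning all 256 dividends, and the exhaustive phase picks the smallest valid m directly from the interval instead of trying every m.
import Mathlib
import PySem

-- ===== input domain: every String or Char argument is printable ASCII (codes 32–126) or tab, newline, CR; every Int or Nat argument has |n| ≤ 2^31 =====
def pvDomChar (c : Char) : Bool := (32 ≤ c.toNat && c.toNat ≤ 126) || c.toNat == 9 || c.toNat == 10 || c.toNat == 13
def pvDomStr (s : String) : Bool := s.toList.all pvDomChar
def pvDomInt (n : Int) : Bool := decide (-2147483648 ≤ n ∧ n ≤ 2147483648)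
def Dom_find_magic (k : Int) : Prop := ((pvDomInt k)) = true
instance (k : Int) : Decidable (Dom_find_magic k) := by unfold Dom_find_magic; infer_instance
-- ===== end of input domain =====

-- B replaces A's 256-dividend scan in _verify by a closed-form admissible interval for m
-- and picks the smallest valid m of the exhaustive phase directly from that interval (objective: faster).

-- ===== PORT A =====

-- _verify's `for a in range(256)` loop with its early `return False`
def verifyLoop (k m s : Int) : List Int → Bool
  | [] => true
  | a :: rest =>
    -- (a * m) >> s; s ∈ 8..19 here so `s.toNat` is exact for Python's shift amount
    if ((a * m) >>> s.toNat) ≠ PySem.Int.floordiv a k then false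
    else verifyLoop k m s rest

def pyVerify (k m s : Int) : Bool := verifyLoop k m s (PySem.List.pyRange 0 256)

-- math.ceil((1 << s) / k): exact integer ceiling; on this task's domain (|k| ≤ 2^31, s ≤ 19)
-- the float quotient is correctly rounded and its error (< 2^-34) is below the distance from any
-- non-integer quotient to the nearest integer (≥ 2^-31), so math.ceil of the float equals this.
def ceilShift (s k : Int) : Int := -(PySem.Int.floordiv (-((1:Int) <<< s.toNat)) k)

-- first loop: `for s in range(8, 20)` with the formula candidate
def phase1 (k : Int) : List Int → Option (Int × Int)
  | [] => none
  | s :: rest =>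
    let m := ceilShift s k
    if 2 ≤ m ∧ m ≤ 255 then
      if pyVerify k m s then some (m, s) else phase1 k rest
    else phase1 k rest

-- inner `for m in range(2, 256)` of the exhaustive loop
def phase2m (k s : Int) : List Int → Option (Int × Int)
  | [] => none
  | m :: rest => if pyVerify k m s then some (m, s) else phase2m k s rest

-- outer `for s in range(8, 20)` of the exhaustive loop
def phase2 (k : Int) : List Int → Option (Int × Int)
  | [] => none
  | s :: rest =>
    match phase2m k s (PySem.List.pyRange 2 256) with
    | some r => some r
    | none => phase2 k rest

def find_magic (k : Int) : Option (Int × Int) :=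
  match phase1 k (PySem.List.pyRange 8 20) with
  | some r => some r
  | none => phase2 k (PySem.List.pyRange 8 20)

-- ===== PORT B =====

-- Source B's _interval(k, s)
def intervalB (k s : Int) : Int × Int :=
  let qmax := PySem.Int.floordiv 255 k
  if qmax = 0 then (2, PySem.Int.floordiv (((1:Int) <<< s.toNat) - 1) 255)
  else
    let lo := -(PySem.Int.floordiv ((1:Int) <<< s.toNat) (-k))  -- -((1 << s) // -k)
    let hi := PySem.Int.floordiv ((qmax + 1) * ((1:Int) <<< s.toNat) - 1) 255
    (lo, min hi (PySem.Int.floordiv (qmax * ((1:Int) <<< s.toNat) - 1) (qmax * k - 1)))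

-- Source B's first loop: formula candidate tested against the interval
def altPhase1 (k : Int) : List Int → Option (Int × Int)
  | [] => none
  | s :: rest =>
    let m := -(PySem.Int.floordiv ((1:Int) <<< s.toNat) (-k))
    if 2 ≤ m ∧ m ≤ 255 then
      let p := intervalB k s
      if p.1 ≤ m ∧ m ≤ p.2 then some (m, s) else altPhase1 k rest
    else altPhase1 k rest

-- Source B's second loop: smallest valid m read off the interval
def altPhase2 (k : Int) : List Int → Option (Int × Int)
  | [] => none
  | s :: rest =>
    let p := intervalB k s
    let m := max p.1 2
    if m ≤ min p.2 255 then some (m, s) else altPhase2 k rest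

def find_magic_alt (k : Int) : Option (Int × Int) :=
  if k < 0 then none
  else
    match altPhase1 k (PySem.List.pyRange 8 20) with
    | some r => some r
    | none => altPhase2 k (PySem.List.pyRange 8 20)

-- ===== PRECONDITION & SPEC =====
-- A raises ZeroDivisionError for k = 0 (in math.ceil((1 << s) / k)); Pre_ excludes exactly that.
def Pre_find_magic (k : Int) : Prop := k ≠ 0
instance (k : Int) : Decidable (Pre_find_magic k) := by unfold Pre_find_magic; infer_instance
def pvWitness_find_magic : Int := 7

def Spec_find_magic (k : Int) (out : Option (Int × Int)) : Prop := out = find_magic_alt k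
instance (k : Int) (out : Option (Int × Int)) : Decidable (Spec_find_magic k out) := by unfold Spec_find_magic; infer_instance

-- ===== CLAIM (what is proved, stated in full; the proofs are below) =====
def Claim_equal_find_magic : Prop := ∀ (k : Int), Dom_find_magic k → Pre_find_magic k → Spec_find_magic k (find_magic k)

-- ===== LEMMAS AND PROOFS =====

theorem fdiv_neg_divisor (a k : Int) (hk : k ≠ 0) : PySem.Int.floordiv a (-k) = PySem.Int.floordiv (-a) k := by
  show Int.fdiv a (-k) = Int.fdiv (-a) k
  rw [Int.fdiv_neg hk, Int.neg_fdiv]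
  split_ifs with h1 h2 <;> simp_all

theorem shiftR_floordiv (x : Int) (n : Nat) : x >>> n = PySem.Int.floordiv x (2 ^ n) := by
  rw [Int.shiftRight_eq_div_pow, PySem.Int.floordiv_eq_ediv_of_pos (by positivity)]
  push_cast
  rfl

theorem one_shiftL (n : Nat) : (1 : Int) <<< n = 2 ^ n := by
  simp [Int.shiftLeft_eq]

theorem floordiv_nonneg' (a b : Int) (ha : 0 ≤ a) (hb : 0 < b) : 0 ≤ PySem.Int.floordiv a b := by
  have := (PySem.Int.le_floordiv_iff_mul_le (a := a) (q := 0) hb).mpr (by simpa using ha)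
  simpa using this

theorem phase2m_none (k s : Int) (l : List Int) (h : ∀ m ∈ l, pyVerify k m s = false) :
    phase2m k s l = none := by
  induction l with
  | nil => rfl
  | cons m rest ih =>
    have hm := h m (by simp)
    simp [phase2m, hm, ih (fun x hx => h x (by simp [hx]))]

theorem verifyLoop_eq_all (k m s : Int) (l : List Int) :
    verifyLoop k m s l = l.all (fun a => ((a * m) >>> s.toNat) == PySem.Int.floordiv a k) := by
  induction l with
  | nil => rfl
  | cons a rest ih =>
    by_cases h : ((a * m) >>> s.toNat) = PySem.Int.floordiv a k <;>
      simp [verifyLoop, h, ih]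

theorem pyVerify_iff_pointwise (k m s : Int) :
    pyVerify k m s = true ↔
      ∀ a : Int, 0 ≤ a → a < 256 → ((a * m) >>> s.toNat) = PySem.Int.floordiv a k := by
  rw [pyVerify, verifyLoop_eq_all, List.all_eq_true]
  constructor
  · intro h a h0 h1
    have := h a (PySem.List.mem_pyRange_one.mpr ⟨h0, h1⟩)
    simpa using this
  · intro h a ha
    have := PySem.List.mem_pyRange_one.mp ha
    simpa using h a this.1 this.2

-- the central fact: for k ≥ 1, 2 ≤ m ≤ 255, s ≥ 8, the 256-dividend check succeeds
-- exactly when m lies in B's closed-form interval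
theorem pyVerify_iff_interval (k m s : Int) (hk : 1 ≤ k) (hm2 : 2 ≤ m) (hm255 : m ≤ 255) (hs : 8 ≤ s) :
    (pyVerify k m s = true) ↔ ((intervalB k s).1 ≤ m ∧ m ≤ (intervalB k s).2) := by
  have hkpos : (0:Int) < k := hk
  have hm0 : (0:Int) ≤ m := by omega
  have hS256 : (256:Int) ≤ 2 ^ s.toNat := by
    have h8 : (2:Int) ^ 8 ≤ 2 ^ s.toNat := pow_le_pow_right₀ (by norm_num) (by omega)
    norm_num at h8; exact h8
  rw [pyVerify_iff_pointwise]
  simp only [intervalB, one_shiftL]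
  set S := (2:Int) ^ s.toNat with hSdef
  have hSpos : (0:Int) < S := by positivity
  have hpt : (∀ a : Int, 0 ≤ a → a < 256 → ((a * m) >>> s.toNat) = PySem.Int.floordiv a k) ↔
      (∀ a : Int, 0 ≤ a → a < 256 → PySem.Int.floordiv (a * m) S = PySem.Int.floordiv a k) := by
    constructor
    · intro h a h0 h1; have := h a h0 h1; rwa [shiftR_floordiv] at this
    · intro h a h0 h1; rw [shiftR_floordiv]; exact h a h0 h1
  rw [hpt]
  set qmax := PySem.Int.floordiv 255 k with hqdef
  have hqb : qmax * k ≤ 255 ∧ (255:Int) < (qmax + 1) * k :=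
    (PySem.Int.floordiv_eq_iff_of_pos hkpos).mp hqdef.symm
  have hq0 : 0 ≤ qmax := floordiv_nonneg' 255 k (by norm_num) hkpos
  by_cases hqz : qmax = 0
  · -- k > 255: every quotient is 0
    have hk256 : (255:Int) < k := by
      have := hqb.2; rw [hqz] at this; simpa using this
    rw [if_pos hqz]
    constructor
    · intro hP
      refine ⟨hm2, ?_⟩
      have h255 := hP 255 (by norm_num) (by norm_num)
      rw [← hqdef, hqz] at h255
      have hb := (PySem.Int.floordiv_eq_iff_of_pos hSpos).mp h255
      have hb2 : 255 * m < S := by have := hb.2; linarith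
      rw [PySem.Int.le_floordiv_iff_mul_le (by norm_num : (0:Int) < 255)]
      omega
    · rintro ⟨h2, hhi⟩
      have hmS : m * 255 ≤ S - 1 :=
        (PySem.Int.le_floordiv_iff_mul_le (by norm_num : (0:Int) < 255)).mp hhi
      intro a h0 h1
      have hak : PySem.Int.floordiv a k = 0 := by
        rw [PySem.Int.floordiv_eq_iff_of_pos hkpos]
        constructor
        · simpa using h0
        · have : a < k := by omega
          linarith
      rw [hak, PySem.Int.floordiv_eq_iff_of_pos hSpos]
      have ham : a * m ≤ 255 * m := mul_le_mul_of_nonneg_right (by omega) hm0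
      constructor
      · simpa using mul_nonneg h0 hm0
      · have : m * 255 = 255 * m := mul_comm _ _
        linarith
  · -- 1 ≤ k ≤ 255
    have hq1 : 1 ≤ qmax := by omega
    rw [if_neg hqz, fdiv_neg_divisor S k (by omega)]
    set c := -(PySem.Int.floordiv (-S) k) with hcdef
    have hcb : (c - 1) * k < S ∧ S ≤ c * k :=
      (PySem.Int.neg_floordiv_neg_eq_iff_of_pos hkpos).mp hcdef.symm
    have ha0 : 1 ≤ qmax * k - 1 := by
      by_cases h2k : 2 ≤ k
      · nlinarith
      · have hk1 : k = 1 := by omega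
        rw [hk1] at hqb ⊢
        omega
    have hHi1 : m ≤ PySem.Int.floordiv ((qmax + 1) * S - 1) 255 ↔ m * 255 ≤ (qmax + 1) * S - 1 :=
      PySem.Int.le_floordiv_iff_mul_le (by norm_num)
    have hHi2 : m ≤ PySem.Int.floordiv (qmax * S - 1) (qmax * k - 1) ↔
        m * (qmax * k - 1) ≤ qmax * S - 1 :=
      PySem.Int.le_floordiv_iff_mul_le (by omega)
    simp only []
    constructor
    · intro hP
      -- dividend 255 gives both 255-bounds
      have h255 := hP 255 (by norm_num) (by norm_num)
      rw [← hqdef] at h255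
      have hb255 := (PySem.Int.floordiv_eq_iff_of_pos hSpos).mp h255
      -- dividend qmax*k pins the lower bound
      have hdq : PySem.Int.floordiv (qmax * k) k = qmax := by
        rw [PySem.Int.floordiv_eq_iff_of_pos hkpos]
        constructor
        · exact le_refl _
        · nlinarith
      have hPq := hP (qmax * k) (by positivity) (by linarith [hqb.1])
      rw [hdq] at hPq
      have hbq := (PySem.Int.floordiv_eq_iff_of_pos hSpos).mp hPq
      have hSkm : S ≤ k * m := by
        by_contra hcon
        rw [not_le] at hcon
        have := mul_lt_mul_of_pos_left hcon (show (0:Int) < qmax by omega)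
        nlinarith [hbq.1]
      have hcm : c ≤ m := by
        have h1 : (c - 1) * k < m * k := by
          have : k * m = m * k := mul_comm _ _
          linarith [hcb.1]
        have := Int.lt_of_mul_lt_mul_right h1 (by omega : (0:Int) ≤ k)
        omega
      -- dividend qmax*k - 1 pins the tight upper bound
      have hdq1 : PySem.Int.floordiv (qmax * k - 1) k = qmax - 1 := by
        rw [PySem.Int.floordiv_eq_iff_of_pos hkpos]
        constructor
        · nlinarith
        · nlinarith
      have hPq1 := hP (qmax * k - 1) (by omega) (by linarith [hqb.1])
      rw [hdq1] at hPq1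
      have hbq1 := (PySem.Int.floordiv_eq_iff_of_pos hSpos).mp hPq1
      refine ⟨hcm, le_min (hHi1.mpr ?_) (hHi2.mpr ?_)⟩
      · have : m * 255 = 255 * m := mul_comm _ _
        linarith [hb255.2]
      · have h1 : (qmax * k - 1) * m < qmax * S := by nlinarith [hbq1.2]
        nlinarith
    · rintro ⟨hcm, hmin⟩
      have hu1 := hHi1.mp (le_trans hmin (min_le_left _ _))
      have hu2 := hHi2.mp (le_trans hmin (min_le_right _ _))
      have hSkm : S ≤ k * m := by nlinarith [hcb.2, mul_le_mul_of_nonneg_right hcm (le_of_lt hkpos)]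
      intro a h0 h1a
      set q := PySem.Int.floordiv a k with hqadef
      have hqa : q * k ≤ a ∧ a < (q + 1) * k :=
        (PySem.Int.floordiv_eq_iff_of_pos hkpos).mp hqadef.symm
      have hqa0 : 0 ≤ q := floordiv_nonneg' a k h0 hkpos
      have hqle : q ≤ qmax := by
        have h1 : q * k < (qmax + 1) * k := by linarith [hqa.1, hqb.2]
        have := Int.lt_of_mul_lt_mul_right h1 (by omega : (0:Int) ≤ k)
        omega
      rw [PySem.Int.floordiv_eq_iff_of_pos hSpos]
      constructor
      · nlinarith [mul_le_mul_of_nonneg_left hSkm hqa0, mul_le_mul_of_nonneg_right hqa.1 hm0]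
      · by_cases hqq : q = qmax
        · have ham : a * m ≤ 255 * m := mul_le_mul_of_nonneg_right (by omega) hm0
          have hcomm : m * 255 = 255 * m := mul_comm _ _
          rw [hqq]
          linarith
        · have hq2 : q + 1 ≤ qmax := by omega
          have hale : a ≤ (q + 1) * k - 1 := by linarith [Int.lt_iff_add_one_le.mp hqa.2]
          have ham : a * m ≤ ((q + 1) * k - 1) * m :=
            mul_le_mul_of_nonneg_right hale hm0
          have hmono : (qmax - (q + 1)) * S ≤ (qmax - (q + 1)) * (k * m) :=
            mul_le_mul_of_nonneg_left hSkm (by omega)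
          nlinarith [hu2]

-- A's formula m and B's formula m agree
theorem ceil_agree (s k : Int) (hk : k ≠ 0) :
    -(PySem.Int.floordiv ((1:Int) <<< s.toNat) (-k)) = ceilShift s k := by
  rw [fdiv_neg_divisor _ _ hk]; rfl

theorem phase1_eq_alt (k : Int) (hk : 1 ≤ k) (l : List Int) (hl : ∀ s ∈ l, 8 ≤ s) :
    phase1 k l = altPhase1 k l := by
  induction l with
  | nil => rfl
  | cons s rest ih =>
    have hs := hl s (by simp)
    have ihr := ih (fun x hx => hl x (by simp [hx]))
    simp only [phase1, altPhase1, ceil_agree s k (by omega)]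
    by_cases hg : 2 ≤ ceilShift s k ∧ ceilShift s k ≤ 255
    · rw [if_pos hg, if_pos hg]
      have hiff := pyVerify_iff_interval k (ceilShift s k) s hk hg.1 hg.2 hs
      by_cases hv : pyVerify k (ceilShift s k) s = true
      · simp [hv, hiff.mp hv]
      · have hni : ¬ ((intervalB k s).1 ≤ ceilShift s k ∧ ceilShift s k ≤ (intervalB k s).2) :=
          fun hc => hv (hiff.mpr hc)
        simp [hv, hni, ihr]
    · rw [if_neg hg, if_neg hg, ihr]

theorem phase2m_scan (k s lo hi : Int) (a b : Int)
    (h : ∀ m, a ≤ m → m < b → (pyVerify k m s = true ↔ lo ≤ m ∧ m ≤ hi)) :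
    phase2m k s (PySem.List.pyRange a b) =
      (if max lo a ≤ min hi (b - 1) then some (max lo a, s) else none) := by
  by_cases hab : a < b
  · rw [PySem.List.pyRange_one_cons hab]
    have hiter := h a (le_refl a) hab
    by_cases hv : pyVerify k a s = true
    · have hin := hiter.mp hv
      simp only [phase2m, hv, if_true]
      rw [if_pos (by omega)]
      congr 2
      omega
    · have hnot : ¬ (lo ≤ a ∧ a ≤ hi) := fun hc => hv (hiter.mpr hc)
      have ih := phase2m_scan k s lo hi (a + 1) b
        (fun m hm1 hm2 => h m (by omega) hm2)
      simp only [phase2m, hv, Bool.false_eq_true, if_false]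
      rw [ih]
      by_cases hlo : a < lo
      · have : max lo (a + 1) = max lo a := by omega
        rw [this]
      · -- a ≥ lo, so a > hi
        have hahi : hi < a := by omega
        rw [if_neg (by omega), if_neg (by omega)]
  · rw [PySem.List.pyRange_one_eq_nil (by omega)]
    simp only [phase2m]
    rw [if_neg (by omega)]
termination_by (b - a).toNat
decreasing_by omega

theorem phase2_eq_alt (k : Int) (hk : 1 ≤ k) (l : List Int) (hl : ∀ s ∈ l, 8 ≤ s) :
    phase2 k l = altPhase2 k l := by
  induction l with
  | nil => rfl
  | cons s rest ih =>
    have hs := hl s (by simp)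
    have ihr := ih (fun x hx => hl x (by simp [hx]))
    have hscan := phase2m_scan k s (intervalB k s).1 (intervalB k s).2 2 256
      (fun m h1 h2 => pyVerify_iff_interval k m s hk h1 (by omega) hs)
    simp only [phase2, altPhase2, hscan]
    norm_num
    split_ifs <;> simp [ihr]

theorem neg_phase1_none (k : Int) (hk : k < 0) (l : List Int) : phase1 k l = none := by
  induction l with
  | nil => rfl
  | cons s rest ih =>
    have hm : ceilShift s k = -(PySem.Int.floordiv ((1:Int) <<< s.toNat) (-k)) := by
      unfold ceilShift
      rw [fdiv_neg_divisor ((1:Int) <<< s.toNat) k (by omega)]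
    have hnn : 0 ≤ PySem.Int.floordiv ((1:Int) <<< s.toNat) (-k) := by
      apply floordiv_nonneg' _ _ _ (by omega)
      rw [one_shiftL]; positivity
    simp only [phase1]
    rw [if_neg (by omega), ih]

theorem pyVerify_false_of_neg (k m s : Int) (hk : k < 0) (hm0 : 0 ≤ m) (hm : m < 256) (hs : 8 ≤ s) :
    pyVerify k m s = false := by
  have hS : (256:Int) ≤ 2 ^ s.toNat := by
    have h8 : (2:Int) ^ 8 ≤ 2 ^ s.toNat := pow_le_pow_right₀ (by norm_num) (by omega)
    norm_num at h8; exact h8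
  rw [← Bool.not_eq_true, pyVerify_iff_pointwise]
  intro hall
  have h1 := hall 1 (by norm_num) (by norm_num)
  rw [shiftR_floordiv] at h1
  have hL : PySem.Int.floordiv (1 * m) (2 ^ s.toNat) = 0 := by
    rw [PySem.Int.floordiv_eq_iff_of_pos (by positivity)]
    constructor <;> omega
  have hR : PySem.Int.floordiv 1 k = -1 := by
    rw [show k = -(-k) by ring, fdiv_neg_divisor 1 (-k) (by omega),
        PySem.Int.floordiv_eq_iff_of_pos (by omega : (0:Int) < -k)]
    constructor <;> omega
  rw [hL, hR] at h1
  exact absurd h1 (by norm_num)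

theorem neg_phase2_none (k : Int) (hk : k < 0) (l : List Int) (hl : ∀ s ∈ l, 8 ≤ s) :
    phase2 k l = none := by
  induction l with
  | nil => rfl
  | cons s rest ih =>
    have hs := hl s (by simp)
    have hinner : phase2m k s (PySem.List.pyRange 2 256) = none := by
      apply phase2m_none
      intro m hm
      have := PySem.List.mem_pyRange_one.mp hm
      exact pyVerify_false_of_neg k m s hk (by omega) (by omega) hs
    simp only [phase2, hinner]
    exact ih (fun x hx => hl x (by simp [hx]))

-- ===== VERDICT (by name: the statement is the Claim_ definition above) =====
theorem find_magic_spec : Claim_equal_find_magic := by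
  intro k _ hk0
  unfold Spec_find_magic find_magic find_magic_alt
  rcases lt_trichotomy k 0 with hneg | h0 | hpos
  · rw [if_pos hneg, neg_phase1_none k hneg, neg_phase2_none k hneg]
    intro s hs
    have := PySem.List.mem_pyRange_one.mp hs
    omega
  · exact absurd h0 hk0
  · rw [if_neg (by omega)]
    have hk : 1 ≤ k := hpos
    have hl : ∀ s ∈ PySem.List.pyRange (8:Int) 20, 8 ≤ s := fun s hs =>
      (PySem.List.mem_pyRange_one.mp hs).1
    rw [phase1_eq_alt k hk _ hl, phase2_eq_alt k hk _ hl]
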